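-- pv_equiv track=rewrite | github.com/queelius/computational-explorations | src/ap_attacks.py | r_k_greedy
-- ===== SOURCE A (Python) =====
-- from typing import Dict, FrozenSet, List, Optional, Set, Tuple
--
-- def r_k_greedy(n: int, k: int) -> Tuple[int, List[int]]:
--     """
--     Greedy construction of k-AP-free subset of [1..n].
--
--     Adds elements left-to-right, skipping any that would complete a k-AP
--     with elements already chosen. Returns (size, sorted list of elements).
--     """
--     A = []
--     A_set = set()
--     for x in range(1, n + 1):
--         # Check if adding x would complete any k-AP with existing elements.
--         # x could sit at any position 0..k-1 in the AP.
--         # For each pair (x, a) with a in A_set, the common difference is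
--         # d = (x - a) / (pos_x - pos_a).  We iterate over every a and
--         # every assignment of positions for x and a.
--         creates_ap = _would_create_kap(x, A_set, k)
--         if not creates_ap:
--             A.append(x)
--             A_set.add(x)
--     return len(A), A
--
-- def _would_create_kap(x: int, A_set: Set[int], k: int) -> bool:
--     """Check if adding x to A_set creates a k-term AP."""
--     # Enumerate all APs through x whose other k-1 members lie in A_set.
--     # An AP containing x has the form {x - j*d, ..., x, ..., x + (k-1-j)*d}
--     # for some d != 0 and position j in 0..k-1.
--     # Equivalently, start = x - j*d, common difference d, for j = 0..k-1.
--     #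
--     # Optimisation: for each pair of existing elements a, b with a < b,
--     # if they are compatible with an AP through x, check it.  But that
--     # is still O(|A|^2).  For the greedy, a simpler approach: for each
--     # element a in A_set, consider d = x - a (so x = a + d), and check
--     # every AP of length k with that common difference that contains both
--     # x and a.
--
--     for a in A_set:
--         d = x - a  # a and x are consecutive in some AP with this diff
--         if d == 0:
--             continue
--         # x = a + d.  An AP with common difference d containing x at
--         # position j has start = x - j*d.  For this AP to also contain a,
--         # a = start + m*d for some m, giving m = j - 1 (since a = x - d).
--         # More generally, for any non-zero d, iterate over all possible
--         # start positions that place x somewhere in a length-k AP.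
--         for j in range(k):
--             start = x - j * d
--             # Check if all k elements of this AP are in A_set ∪ {x}
--             all_in = True
--             for m in range(k):
--                 elem = start + m * d
--                 if elem == x:
--                     continue
--                 if elem not in A_set:
--                     all_in = False
--                     break
--             if all_in:
--                 return True
--     return False
-- ===== SOURCE B (Python) =====
-- def r_k_greedy(n: int, k: int):
--     """Greedy k-AP-free subset of [1..n], built with a run-length DP.
--
--     run[(a, d)] = length of the longest chosen AP ...,a-2d,a-d,a with
--     common difference d ending at a (only stored when both a and a-d are
--     chosen).  A new x completes a k-AP iff some chosen run with last
--     element a = x - d already has length >= k-1; on acceptance each run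
--     is extended to x.  No membership scans over candidate AP elements.
--     """
--     chosen = []
--     run = {}
--     for x in range(1, n + 1):
--         if not any(run.get((a, x - a), 1) >= k - 1 for a in chosen):
--             for a in chosen:
--                 run[(x, x - a)] = run.get((a, x - a), 1) + 1
--             chosen.append(x)
--     return len(chosen), chosen
-- ===== Notes on version B (the rewrite author's own statement) =====
-- stated objective: faster
-- what changed: B replaces A's membership scans over every position and member of candidate APs by an incremental run-length dictionary (last element, common difference) -> length of the chosen AP ending there, so each candidate x is accepted or rejected with one dict lookup per chosen element (O(|A|) per candidate instead of O(|A|*k^2)) and accepted elements extend the runs.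
-- outside the precondition, e.g. on r_k_greedy(3, 0): A returns (3, [1, 2, 3]), B returns (1, [1])
import Mathlib
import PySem

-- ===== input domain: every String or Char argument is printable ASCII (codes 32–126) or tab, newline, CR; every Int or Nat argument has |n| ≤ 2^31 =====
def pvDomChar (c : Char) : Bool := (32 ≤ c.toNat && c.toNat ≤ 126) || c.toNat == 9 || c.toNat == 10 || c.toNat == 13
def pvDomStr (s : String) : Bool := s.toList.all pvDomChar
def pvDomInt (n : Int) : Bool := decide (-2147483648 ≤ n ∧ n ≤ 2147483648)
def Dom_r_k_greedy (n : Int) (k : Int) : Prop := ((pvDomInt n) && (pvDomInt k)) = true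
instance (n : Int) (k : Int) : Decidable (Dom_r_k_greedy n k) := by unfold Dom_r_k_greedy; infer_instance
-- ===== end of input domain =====

-- B replaces A's per-candidate membership scan over all positions/members of candidate APs
-- by a run-length dictionary (last element, difference) ↦ length of chosen AP ending there,
-- so accepting or rejecting a candidate is one dict lookup per chosen element; objective: faster.

-- ===== PORT A =====
def pvWouldCreateKap (x : Int) (aSet : PySem.Set Int) (k : Int) : Bool :=
  aSet.any (fun a =>
    let d := x - a
    if d = 0 then false
    else
      (PySem.List.pyRange 0 k 1).any (fun j =>
        let start := x - j * d
        (PySem.List.pyRange 0 k 1).all (fun m =>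
          let elem := start + m * d
          (elem == x) || PySem.Set.contains aSet elem)))

def pvStepA (k : Int) (st : List Int × PySem.Set Int) (x : Int) : List Int × PySem.Set Int :=
  if pvWouldCreateKap x st.2 k then st else (st.1 ++ [x], PySem.Set.add st.2 x)

def r_k_greedy (n : Int) (k : Int) : Int × List Int :=
  let st := (PySem.List.pyRange 1 (n + 1) 1).foldl (pvStepA k) ([], PySem.Set.empty)
  ((st.1.length : Int), st.1)

-- ===== PORT B =====
def pvStepB (k : Int) (st : List Int × PySem.Dict (Int × Int) Int) (x : Int) :
    List Int × PySem.Dict (Int × Int) Int :=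
  if st.1.any (fun a => decide (st.2.getD (a, x - a) 1 ≥ k - 1)) then st
  else
    (st.1 ++ [x],
     st.1.foldl (fun r a => r.insert (x, x - a) (r.getD (a, x - a) 1 + 1)) st.2)

def r_k_greedy_alt (n : Int) (k : Int) : Int × List Int :=
  let st := (PySem.List.pyRange 1 (n + 1) 1).foldl (pvStepB k) ([], PySem.Dict.empty)
  ((st.1.length : Int), st.1)

-- ===== PRECONDITION & SPEC =====
-- Pre_ excludes k ≤ 0, which is outside the task's natural domain (an arithmetic progression
-- has a positive number of terms), so neither behaviour is specified there: A keeps every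
-- element of [1..n], B keeps only 1.
def Pre_r_k_greedy (_n : Int) (k : Int) : Prop := 1 ≤ k
instance (n : Int) (k : Int) : Decidable (Pre_r_k_greedy n k) := by unfold Pre_r_k_greedy; infer_instance
def pvWitness_r_k_greedy : Int × Int := (9, 3)
def Spec_r_k_greedy (n : Int) (k : Int) (out : Int × List Int) : Prop := out = r_k_greedy_alt n k
instance (n : Int) (k : Int) (out : Int × List Int) : Decidable (Spec_r_k_greedy n k out) := by unfold Spec_r_k_greedy; infer_instance

-- ===== CLAIM (what is proved, stated in full; the proofs are below) =====
def Claim_equal_r_k_greedy : Prop := ∀ (n : Int) (k : Int), Dom_r_k_greedy n k → Pre_r_k_greedy n k → Spec_r_k_greedy n k (r_k_greedy n k)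

-- ===== LEMMAS AND PROOFS =====

-- Invariant of B's dictionary: a key (y, d) is present iff y and y - d are chosen, and its
-- value v is the length of the maximal chosen AP with difference d ending at y.
def pvInv (S : List Int) (run : PySem.Dict (Int × Int) Int) : Prop :=
  (∀ y d : Int, 1 ≤ d → ((run.get? (y, d)).isSome ↔ (y ∈ S ∧ y - d ∈ S))) ∧
  (∀ y d v : Int, 1 ≤ d → run.get? (y, d) = some v →
     2 ≤ v ∧ (∀ i : Int, 0 ≤ i → i < v → y - i * d ∈ S) ∧ y - v * d ∉ S)

theorem pv_add_append (s : List Int) (x : Int) (hx : x ∉ s) :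
    PySem.Set.add s x = s ++ [x] := by
  simp [PySem.Set.add, hx]

-- A's check, characterised: some chosen a gives difference d = x - a whose whole downward
-- AP x - d, …, x - (k-1)d is chosen (elements below x: x can only be the AP's maximum).
theorem pv_wck_iff (x k : Int) (s : List Int) (hk : 1 ≤ k) (hs : ∀ a ∈ s, a < x) :
    pvWouldCreateKap x s k = true ↔
      ∃ a ∈ s, ∀ i : Int, 1 ≤ i → i < k → x - i * (x - a) ∈ s := by
  simp only [pvWouldCreateKap, List.any_eq_true]
  constructor
  · rintro ⟨a, ha, hp⟩
    have hd : 0 < x - a := by have := hs a ha; omega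
    rw [if_neg (by omega)] at hp
    simp only [List.any_eq_true, List.all_eq_true, PySem.List.mem_pyRange_one,
      Bool.or_eq_true, beq_iff_eq, PySem.Set.contains_iff] at hp
    obtain ⟨j, ⟨hj0, hjk⟩, hall⟩ := hp
    refine ⟨a, ha, ?_⟩
    intro i hi1 hik
    -- first: j = k - 1
    have hj : j = k - 1 := by
      by_contra hne
      have hjlt : j < k - 1 := by omega
      have := hall (k - 1) ⟨by omega, by omega⟩
      have hpos : 0 < (k - 1 - j) * (x - a) := by
        apply mul_pos <;> omega
      have heq : x - j * (x - a) + (k - 1) * (x - a) = x + (k - 1 - j) * (x - a) := by ring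
      rw [heq] at this
      rcases this with h | h
      · omega
      · have := hs _ h; omega
    subst hj
    have := hall (k - 1 - i) ⟨by omega, by omega⟩
    have heq : x - (k - 1) * (x - a) + (k - 1 - i) * (x - a) = x - i * (x - a) := by ring
    rw [heq] at this
    rcases this with h | h
    · exfalso
      have hpos : 0 < i * (x - a) := mul_pos (by omega) (by omega)
      omega
    · exact h
  · rintro ⟨a, ha, hp⟩
    have hd : 0 < x - a := by have := hs a ha; omega
    refine ⟨a, ha, ?_⟩
    rw [if_neg (by omega)]
    simp only [List.any_eq_true, List.all_eq_true, PySem.List.mem_pyRange_one,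
      Bool.or_eq_true, beq_iff_eq, PySem.Set.contains_iff]
    refine ⟨k - 1, ⟨by omega, by omega⟩, ?_⟩
    intro m ⟨hm0, hmk⟩
    by_cases hm : m = k - 1
    · left; subst hm; ring
    · right
      have := hp (k - 1 - m) (by omega) (by omega)
      have heq : x - (k - 1) * (x - a) + m * (x - a) = x - (k - 1 - m) * (x - a) := by ring
      rw [heq]
      exact this

-- B's dict lookup answers exactly that downward-AP membership question.
theorem pv_dict_check (x k : Int) (S : List Int) (run : PySem.Dict (Int × Int) Int)
    (hInv : pvInv S run) (a : Int) (ha : a ∈ S) (hax : a < x) :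
    (run.getD (a, x - a) 1 ≥ k - 1) ↔
      ∀ i : Int, 1 ≤ i → i < k → x - i * (x - a) ∈ S := by
  have hd : (1 : Int) ≤ x - a := by omega
  cases hget : run.get? (a, x - a) with
  | none =>
    have hiff := hInv.1 a (x - a) hd
    rw [hget] at hiff
    simp only [Option.isSome_none, Bool.false_eq_true, false_iff] at hiff
    have hout : a - (x - a) ∉ S := fun h => hiff ⟨ha, h⟩
    rw [PySem.Dict.getD_of_get?_eq_none run 1 hget]
    constructor
    · intro h1 i hi1 hik
      have : i = 1 := by omega
      subst this
      have : x - 1 * (x - a) = a := by ring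
      rw [this]; exact ha
    · intro hall
      by_contra hlt
      have h2 := hall 2 (by omega) (by omega)
      have : x - 2 * (x - a) = a - (x - a) := by ring
      rw [this] at h2
      exact hout h2
  | some v =>
    obtain ⟨hv2, hmem, hout⟩ := hInv.2 a (x - a) v hd hget
    rw [PySem.Dict.getD_of_get?_eq_some run 1 hget]
    constructor
    · intro hvk i hi1 hik
      have := hmem (i - 1) (by omega) (by omega)
      have heq : a - (i - 1) * (x - a) = x - i * (x - a) := by ring
      rw [heq] at this
      exact this
    · intro hall
      by_contra hvk
      have := hall (v + 1) (by omega) (by omega)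
      have heq : x - (v + 1) * (x - a) = a - v * (x - a) := by ring
      rw [heq] at this
      exact hout this

-- The update loop of B, characterised key by key.
theorem pv_fold_insert_get (x : Int) :
    ∀ (L : List Int) (run : PySem.Dict (Int × Int) Int), (∀ a ∈ L, a < x) →
    ∀ y d : Int,
    ((L.foldl (fun r a => r.insert (x, x - a) (r.getD (a, x - a) 1 + 1)) run).get? (y, d))
      = if y = x ∧ x - d ∈ L then some (run.getD (x - d, d) 1 + 1) else run.get? (y, d) := by
  intro L
  induction L with
  | nil =>
    intro run _ y d
    simp
  | cons a L ih =>
    intro run hlt y d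
    have hax : a < x := hlt a (List.mem_cons_self ..)
    simp only [List.foldl_cons]
    rw [ih _ (fun b hb => hlt b (List.mem_cons_of_mem _ hb))]
    by_cases hc : y = x ∧ x - d ∈ L
    · rw [if_pos hc, if_pos ⟨hc.1, List.mem_cons_of_mem _ hc.2⟩]
      have hxd : x - d < x := hlt _ (List.mem_cons_of_mem _ hc.2)
      have hne : ((x - d, d) : Int × Int) ≠ (x, x - a) := by
        intro h
        have := congrArg Prod.fst h
        simp at this
        omega
      rw [PySem.Dict.getD_insert, if_neg hne]
    · rw [if_neg hc]
      by_cases hk2 : ((y, d) : Int × Int) = (x, x - a)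
      · obtain ⟨hy, hdd⟩ := Prod.mk.injEq .. ▸ hk2
        rw [PySem.Dict.get?_insert, if_pos hk2,
          if_pos ⟨hy, by rw [hdd]; simp⟩]
        have h1 : x - d = a := by omega
        rw [h1, hdd]
      · rw [PySem.Dict.get?_insert, if_neg hk2, if_neg ?_]
        rintro ⟨hy, hmem⟩
        rcases List.mem_cons.mp hmem with h | h
        · exact hk2 (by subst hy; simp [Prod.ext_iff]; omega)
        · exact hc ⟨hy, h⟩

-- The invariant is preserved when x is accepted.
theorem pv_inv_step (x : Int) (L : List Int) (run : PySem.Dict (Int × Int) Int)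
    (hL : ∀ a ∈ L, a < x) (hInv : pvInv L run) :
    pvInv (L ++ [x]) (L.foldl (fun r a => r.insert (x, x - a) (r.getD (a, x - a) 1 + 1)) run) := by
  have hget := pv_fold_insert_get x L run hL
  have hxL : x ∉ L := fun h => absurd (hL x h) (lt_irrefl x)
  constructor
  · intro y d hd
    rw [hget y d]
    by_cases hy : y = x
    · by_cases hm : x - d ∈ L
      · rw [if_pos ⟨hy, hm⟩]
        simp only [Option.isSome_some, true_iff]
        refine ⟨?_, ?_⟩
        · rw [hy]; simp
        · rw [hy]; exact List.mem_append_left _ hm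
      · rw [if_neg (fun h => hm h.2)]
        rw [hInv.1 y d hd]
        constructor
        · rintro ⟨h1, -⟩
          exact absurd (hy ▸ h1) hxL
        · rintro ⟨-, hmem⟩
          rcases List.mem_append.mp hmem with h | h
          · exact absurd (hy ▸ h) hm
          · simp at h; omega
    · rw [if_neg (by tauto)]
      have hiff := hInv.1 y d hd
      rw [hiff]
      constructor
      · rintro ⟨h1, h2⟩
        exact ⟨List.mem_append_left _ h1, List.mem_append_left _ h2⟩
      · rintro ⟨h1, h2⟩
        have hy1 : y ∈ L := by
          rcases List.mem_append.mp h1 with h | h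
          · exact h
          · simp at h; exact absurd h hy
        have hylt : y < x := hL y hy1
        refine ⟨hy1, ?_⟩
        rcases List.mem_append.mp h2 with h | h
        · exact h
        · simp at h; omega
  · intro y d v hd hv
    rw [hget y d] at hv
    by_cases hc : y = x ∧ x - d ∈ L
    · obtain ⟨hy, hm⟩ := hc
      rw [if_pos ⟨hy, hm⟩] at hv
      have hv' : v = run.getD (x - d, d) 1 + 1 := by
        injection hv with h; omega
      rw [hy]
      cases hget2 : run.get? (x - d, d) with
      | none =>
        have hiff := hInv.1 (x - d) d hd
        rw [hget2] at hiff
        simp only [Option.isSome_none, Bool.false_eq_true, false_iff] at hiff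
        have hout : x - d - d ∉ L := fun h => hiff ⟨hm, h⟩
        rw [PySem.Dict.getD_of_get?_eq_none run 1 hget2] at hv'
        refine ⟨by omega, ?_, ?_⟩
        · intro i hi0 hiv
          rcases (by omega : i = 0 ∨ i = 1) with h | h
          · subst h; simp
          · subst h
            have : x - 1 * d = x - d := by ring
            rw [this]
            exact List.mem_append_left _ hm
        · have : x - v * d = x - d - d := by rw [hv']; ring
          rw [this]
          intro h
          rcases List.mem_append.mp h with h | h
          · exact hout h
          · simp at h; omega
      | some w =>
        obtain ⟨hw2, hwmem, hwout⟩ := hInv.2 (x - d) d w hd hget2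
        rw [PySem.Dict.getD_of_get?_eq_some run 1 hget2] at hv'
        refine ⟨by omega, ?_, ?_⟩
        · intro i hi0 hiv
          rcases (by omega : i = 0 ∨ 1 ≤ i) with h | h
          · subst h; simp
          · have := hwmem (i - 1) (by omega) (by omega)
            have heq : x - d - (i - 1) * d = x - i * d := by ring
            rw [heq] at this
            exact List.mem_append_left _ this
        · have heq : x - v * d = x - d - w * d := by rw [hv']; ring
          rw [heq]
          intro h
          rcases List.mem_append.mp h with h | h
          · exact hwout h
          · simp at h
            have hpos : 0 < w * d := mul_pos (by omega) (by omega)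
            omega
    · rw [if_neg hc] at hv
      obtain ⟨hv2, hmem, hout⟩ := hInv.2 y d v hd hv
      have hyL : y ∈ L := by
        have := (hInv.1 y d hd).mp (by rw [hv]; rfl)
        exact this.1
      have hylt : y < x := hL y hyL
      refine ⟨hv2, fun i hi0 hiv => List.mem_append_left _ (hmem i hi0 hiv), ?_⟩
      intro h
      rcases List.mem_append.mp h with h | h
      · exact hout h
      · simp at h
        have hpos : 0 < v * d := mul_pos (by omega) (by omega)
        omega

-- Both loops keep the same chosen list.
theorem pv_loop (k : Int) (hk : 1 ≤ k) :
    ∀ (xs L : List Int) (run : PySem.Dict (Int × Int) Int),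
    L.Pairwise (· < ·) → xs.Pairwise (· < ·) → (∀ a ∈ L, ∀ x ∈ xs, a < x) → pvInv L run →
    (xs.foldl (pvStepA k) (L, L)).1 = (xs.foldl (pvStepB k) (L, run)).1 := by
  intro xs
  induction xs with
  | nil => intro L run _ _ _ _; rfl
  | cons x xs ih =>
    intro L run hLp hxs hlt hInv
    have hax : ∀ a ∈ L, a < x := fun a ha => hlt a ha x (List.mem_cons_self ..)
    have hxs' : xs.Pairwise (· < ·) := hxs.tail
    have hxlt : ∀ y ∈ xs, x < y := fun y hy => (List.pairwise_cons.mp hxs).1 y hy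
    have hchk : pvWouldCreateKap x L k = L.any (fun a => decide (run.getD (a, x - a) 1 ≥ k - 1)) := by
      rw [Bool.eq_iff_iff, pv_wck_iff x k L hk hax, List.any_eq_true]
      constructor
      · rintro ⟨a, ha, hp⟩
        exact ⟨a, ha, decide_eq_true ((pv_dict_check x k L run hInv a ha (hax a ha)).mpr hp)⟩
      · rintro ⟨a, ha, hp⟩
        exact ⟨a, ha, (pv_dict_check x k L run hInv a ha (hax a ha)).mp (of_decide_eq_true hp)⟩
    simp only [List.foldl_cons, pvStepA, pvStepB, hchk]
    by_cases hc : L.any (fun a => decide (run.getD (a, x - a) 1 ≥ k - 1)) = true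
    · simp only [hc, if_true]
      exact ih L run hLp hxs' (fun a ha y hy => hlt a ha y (List.mem_cons_of_mem _ hy)) hInv
    · simp only [hc, if_false, Bool.false_eq_true]
      have hxL : x ∉ L := fun h => absurd (hax x h) (lt_irrefl x)
      have hadd : PySem.Set.add L x = L ++ [x] := pv_add_append L x hxL
      rw [hadd]
      have hLp' : (L ++ [x]).Pairwise (· < ·) := by
        rw [List.pairwise_append]
        exact ⟨hLp, List.pairwise_singleton _ _, fun a ha y hy => by
          rw [List.mem_singleton] at hy; subst hy; exact hax a ha⟩
      have hlt' : ∀ a ∈ L ++ [x], ∀ y ∈ xs, a < y := by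
        intro a ha y hy
        rcases List.mem_append.mp ha with h | h
        · exact hlt a h y (List.mem_cons_of_mem _ hy)
        · rw [List.mem_singleton] at h; subst h; exact hxlt y hy
      exact ih (L ++ [x]) _ hLp' hxs' hlt' (pv_inv_step x L run hax hInv)

-- ===== VERDICT (by name: the statement is the Claim_ definition above) =====
theorem r_k_greedy_spec : Claim_equal_r_k_greedy := by
  intro n k _ hk
  unfold Spec_r_k_greedy r_k_greedy r_k_greedy_alt
  have hxs : (PySem.List.pyRange 1 (n + 1) 1).Pairwise (· < ·) :=
    PySem.List.pairwise_lt_pyRange_one 1 (n + 1)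
  have hInv0 : pvInv [] PySem.Dict.empty := by
    constructor
    · intro y d hd; simp [PySem.Dict.get?_empty]
    · intro y d v hd h; simp [PySem.Dict.get?_empty] at h
  have hfst := pv_loop k hk (PySem.List.pyRange 1 (n + 1) 1) [] PySem.Dict.empty
    List.Pairwise.nil hxs (by intro a ha; simp at ha) hInv0
  simp only [PySem.Set.empty] at hfst ⊢
  rw [hfst]
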